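-- pv_equiv track=rewrite | github.com/NghiaNguyenDuy/CMS-Medicare-PartD-Recommendation | ml_model/ranking_utils.py | groups_are_contiguous
-- ===== SOURCE A (Python) =====
-- def groups_are_contiguous(group_ids):
--     """Return True when each group appears in one contiguous block."""
--     seen = set()
--     current = object()
--     for group_id in group_ids:
--         if group_id != current:
--             if group_id in seen:
--                 return False
--             seen.add(group_id)
--             current = group_id
--     return True
-- ===== SOURCE B (Python) =====
-- def groups_are_contiguous(group_ids):
--     """Return True when each group appears in one contiguous block."""
--     if not group_ids:
--         return True
--     changes = sum(a != b for a, b in zip(group_ids, group_ids[1:]))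
--     return changes + 1 == len(set(group_ids))
-- ===== Notes on version B (the rewrite author's own statement) =====
-- stated objective: alternative
-- what changed: B uses a counting identity: it counts adjacent positions where the value changes and returns whether changes+1 equals the number of distinct values in the whole list, instead of A's scan that maintains a moving 'current' sentinel and an incrementally grown 'seen' set with an early False return.
import Mathlib
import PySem

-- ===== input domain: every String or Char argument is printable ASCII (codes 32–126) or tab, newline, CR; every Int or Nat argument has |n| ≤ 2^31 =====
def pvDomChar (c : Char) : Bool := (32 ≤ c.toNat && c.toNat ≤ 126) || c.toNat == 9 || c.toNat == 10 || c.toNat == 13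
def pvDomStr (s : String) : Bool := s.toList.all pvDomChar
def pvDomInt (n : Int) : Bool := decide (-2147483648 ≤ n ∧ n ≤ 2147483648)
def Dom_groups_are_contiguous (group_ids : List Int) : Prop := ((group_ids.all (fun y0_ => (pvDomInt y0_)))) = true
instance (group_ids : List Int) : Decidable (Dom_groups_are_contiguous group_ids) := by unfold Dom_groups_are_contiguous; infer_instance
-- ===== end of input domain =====

-- B replaces A's sentinel/seen-set scan by a counting identity: #adjacent-changes + 1 = #distinct values
-- iff every group is one contiguous block; same return value, proved below.

-- ===== PORT A =====
-- A's loop: state (seen, current); 'current = object()' starts unequal to every int → Option Int, none.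
def pvLoopA : List Int → PySem.Set Int → Option Int → Bool
  | [], _, _ => true
  | x :: xs, seen, cur =>
    if cur = some x then pvLoopA xs seen cur
    else if PySem.Set.contains seen x then false
    else pvLoopA xs (PySem.Set.add seen x) (some x)

def groups_are_contiguous (group_ids : List Int) : Bool :=
  pvLoopA group_ids PySem.Set.empty none

-- ===== PORT B =====
-- if not group_ids: return True
-- changes = sum(a != b for a, b in zip(group_ids, group_ids[1:]))
-- return changes + 1 == len(set(group_ids))
def groups_are_contiguous_alt (group_ids : List Int) : Bool :=
  match group_ids with
  | [] => true
  | _ =>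
    let changes :=
      ((group_ids.zip (PySem.List.slice group_ids (some 1) none)).countP
        (fun p => p.1 ≠ p.2))
    changes + 1 == (PySem.Set.ofList group_ids).length

-- ===== PRECONDITION & SPEC =====
def Spec_groups_are_contiguous (group_ids : List Int) (out : Bool) : Prop := out = groups_are_contiguous_alt group_ids
instance (group_ids : List Int) (out : Bool) : Decidable (Spec_groups_are_contiguous group_ids out) := by unfold Spec_groups_are_contiguous; infer_instance

-- ===== CLAIM (what is proved, stated in full; the proofs are below) =====
def Claim_equal_groups_are_contiguous : Prop := ∀ (group_ids : List Int), Dom_groups_are_contiguous group_ids → Spec_groups_are_contiguous group_ids (groups_are_contiguous group_ids)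

-- ===== LEMMAS AND PROOFS =====

-- reference run-key function: collapse maximal contiguous blocks, given the previous key
def pvRK : Option Int → List Int → List Int
  | _, [] => []
  | cur, x :: xs => if cur = some x then pvRK cur xs else x :: pvRK (some x) xs

theorem pvLoopA_iff (xs : List Int) (seen : PySem.Set Int) (cur : Option Int) :
    pvLoopA xs seen cur = true ↔
      (pvRK cur xs).Nodup ∧ ∀ k ∈ pvRK cur xs, PySem.Set.contains seen k = false := by
  induction xs generalizing seen cur with
  | nil => simp [pvLoopA, pvRK]
  | cons x xs ih =>
    by_cases h : cur = some x
    · simp [pvLoopA, pvRK, h, ih]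
    · by_cases hs : PySem.Set.contains seen x
      · simp only [pvLoopA, pvRK, if_neg h, if_pos hs]
        simp only [List.nodup_cons, List.mem_cons]
        constructor
        · intro hf; exact absurd hf (by simp)
        · rintro ⟨_, hall⟩
          have := hall x (Or.inl rfl)
          rw [this] at hs; exact absurd hs (by simp)
      · simp only [pvLoopA, pvRK, if_neg h, if_neg hs, ih]
        simp only [List.nodup_cons, List.mem_cons]
        constructor
        · rintro ⟨hnd, hall⟩
          have hx : x ∉ pvRK (some x) xs := by
            intro hm
            have h1 := hall x hm
            rw [Bool.eq_false_iff] at h1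
            exact h1 (by simp [PySem.Set.mem_add])
          refine ⟨⟨hx, hnd⟩, ?_⟩
          rintro k (rfl | hk)
          · simpa using hs
          · have h1 := hall k hk
            simp only [Bool.eq_false_iff, ne_eq, PySem.Set.contains_iff, PySem.Set.mem_add] at h1 ⊢
            intro hmem
            exact h1 (Or.inl hmem)
        · rintro ⟨⟨hx, hnd⟩, hall⟩
          refine ⟨hnd, fun k hk => ?_⟩
          have hks := hall k (Or.inr hk)
          simp only [Bool.eq_false_iff, ne_eq, PySem.Set.contains_iff, PySem.Set.mem_add] at hks ⊢
          rintro (hmem | rfl)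
          · exact hks hmem
          · exact hx hk

theorem pvA_iff (xs : List Int) :
    groups_are_contiguous xs = true ↔ (pvRK none xs).Nodup := by
  rw [groups_are_contiguous, pvLoopA_iff]
  simp [PySem.Set.empty]

theorem pvRK_cons_eq (x : Int) (xs : List Int) :
    pvRK (some x) (x :: xs) = pvRK (some x) xs := by simp [pvRK]

theorem pvRK_cons_ne {x y : Int} (h : y ≠ x) (xs : List Int) :
    pvRK (some x) (y :: xs) = y :: pvRK (some y) xs := by
  have hne : ¬ ((some x : Option Int) = some y) := by
    intro e; exact h (Option.some.inj e).symm
  simp only [pvRK]; rw [if_neg hne]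

-- counting adjacent changes counts the run keys after the first
theorem pvChanges_eq_rk_len (xs : List Int) (c : Int) :
    ((c :: xs).zip xs).countP (fun p => p.1 ≠ p.2) = (pvRK (some c) xs).length := by
  induction xs generalizing c with
  | nil => simp [pvRK]
  | cons y ys ih =>
    have hz : (c :: y :: ys).zip (y :: ys) = (c, y) :: ((y :: ys).zip ys) := rfl
    rw [hz, List.countP_cons]
    by_cases h : y = c
    · subst h
      rw [pvRK_cons_eq]
      simpa using ih y
    · rw [pvRK_cons_ne h, List.length_cons]
      have := ih y
      simp only [ne_eq, decide_not] at this ⊢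
      rw [this]
      have hcy : ¬ c = y := fun e => h e.symm
      simp [hcy]

-- the run keys have the same members as the list (given the previous key)
theorem pvRK_mem (xs : List Int) (c a : Int) :
    (a ∈ pvRK (some c) xs ∨ a = c) ↔ (a ∈ xs ∨ a = c) := by
  induction xs generalizing c with
  | nil => simp [pvRK]
  | cons x xs ih =>
    by_cases h : x = c
    · subst h
      rw [pvRK_cons_eq, List.mem_cons, ih]
      tauto
    · rw [pvRK_cons_ne h, List.mem_cons, List.mem_cons]
      constructor
      · rintro ((rfl | hm) | rfl)
        · tauto
        · have := (ih x).mp (Or.inl hm); tauto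
        · tauto
      · rintro ((rfl | hm) | rfl)
        · tauto
        · have := (ih x).mpr (Or.inl hm)
          tauto
        · tauto

theorem pvRK_toFinset (x : Int) (xs : List Int) :
    (x :: pvRK (some x) xs).toFinset = (x :: xs).toFinset := by
  ext a
  simp only [List.mem_toFinset, List.mem_cons]
  have := pvRK_mem xs x a
  tauto

-- |set(l)| = |l.toFinset|
theorem pvOfList_card (l : List Int) :
    (PySem.Set.ofList l).length = l.toFinset.card := by
  have hnd : (PySem.Set.ofList l).Nodup := PySem.Set.nodup_ofList l
  have hfs : (PySem.Set.ofList l).toFinset = l.toFinset := by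
    ext a
    simp [List.mem_toFinset, PySem.Set.mem_ofList]
  rw [← List.toFinset_card_of_nodup hnd, hfs]

theorem pvNodup_iff_card (l : List Int) :
    l.Nodup ↔ l.length = l.toFinset.card := by
  constructor
  · intro h; exact (List.toFinset_card_of_nodup h).symm
  · intro h
    rw [List.card_toFinset] at h
    have hsub : l.dedup.Sublist l := List.dedup_sublist l
    have : l.dedup = l := hsub.eq_of_length h.symm
    rw [← this]; exact List.nodup_dedup l

-- ===== VERDICT (by name: the statement is the Claim_ definition above) =====
theorem groups_are_contiguous_spec : Claim_equal_groups_are_contiguous := by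
  intro xs _
  unfold Spec_groups_are_contiguous
  cases xs with
  | nil => decide
  | cons x rest =>
    have hslice : PySem.List.slice (x :: rest) (some (1 : Int)) none = rest := by
      have := PySem.List.slice_from_natCast (xs := x :: rest) (a := 1)
      simpa using this
    have hA : groups_are_contiguous (x :: rest) = true ↔ (pvRK none (x :: rest)).Nodup :=
      pvA_iff (x :: rest)
    have hrk : pvRK none (x :: rest) = x :: pvRK (some x) rest := by
      simp [pvRK]
    have hB : groups_are_contiguous_alt (x :: rest) = true ↔ (pvRK none (x :: rest)).Nodup := by
      show ((((x :: rest).zip (PySem.List.slice (x :: rest) (some 1) none)).countP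
          (fun p => p.1 ≠ p.2)) + 1 == (PySem.Set.ofList (x :: rest)).length) = true
        ↔ (pvRK none (x :: rest)).Nodup
      rw [hslice, pvChanges_eq_rk_len, pvOfList_card, beq_iff_eq, hrk,
        pvNodup_iff_card, ← pvRK_toFinset]
      simp only [List.length_cons]
    exact Bool.eq_iff_iff.mpr (hA.trans hB.symm)
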